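-- pv_equiv track=rewrite | github.com/avishek376/Scaler-Problem-Solving | Advanced/02 Advanced DSA : Arrays - 2 /Homework/Q2. Maximum Sum Square SubMatrix/Maximum Sum Square SubMatrix.py | solve
-- ===== SOURCE A (Python) =====
-- def solve(A, B):
--     N = len(A)
--     N = len(A[0])
--
--     # creating pf
--     pf = [[0] * N for i in range(N)]
--
--     # row-wise pf
--     for i in range(N):
--         for j in range(N):
--             if i == 0:
--                 pf[i][j] = A[i][j]
--             else:
--                 pf[i][j] = pf[i - 1][j] + A[i][j]
--
--     # col-wise pf
--     for i in range(N):
--         for j in range(N):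
--             if j == 0:
--                 continue
--             else:
--                 pf[i][j] = pf[i][j - 1] + pf[i][j]
--
--     max_sum = float('-inf')
--
--     # sliding window
--     for x in range(N - B + 1):
--         for y in range(N - B + 1):
--             a1, b1 = x, y
--             a2, b2 = x + B - 1, y + B - 1
--
--             cur_sum = pf[a2][b2]
--
--             if a1 > 0:
--                 cur_sum -= pf[a1 - 1][b2]
--
--             if b1 > 0:
--                 cur_sum -= pf[a2][b1 - 1]
--
--             if a1 > 0 and b1 > 0:
--                 cur_sum += pf[a1 - 1][b1 - 1]
--
--             max_sum = max(max_sum, cur_sum)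
--
--     return max_sum
-- ===== SOURCE B (Python) =====
-- def solve(A, B):
--     N = len(A[0])
--     V = []
--     best = float('-inf')
--     for x in range(N - B + 1):
--         if x == 0:
--             # vertical window sums of height B for the top row of windows
--             V = [sum(A[i][j] for i in range(B)) for j in range(N)]
--         else:
--             # slide the vertical windows one row down
--             V = [V[j] + A[x + B - 1][j] - A[x - 1][j] for j in range(N)]
--         # horizontal sliding window of width B over V
--         s = sum(V[:B])
--         best = max(best, s)
--         for y in range(1, N - B + 1):
--             s += V[y + B - 1] - V[y - 1]
--             best = max(best, s)
--     return best
-- ===== Notes on version B (the rewrite author's own statement) =====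
-- stated objective: faster
-- what changed: Replaces the 2D prefix-sum table with inclusion-exclusion queries by incremental sliding windows: a vector of vertical column sums of height B is slid down one row at a time and a horizontal window of width B slides over it; no N x N prefix table is built (same O(N^2) asymptotics, measurably faster by constant factor: two fewer full passes and no table allocation).
-- outside the precondition, e.g. on solve([[1, 2], [3, 4]], 0): A returns 10, B returns 0; on solve([[1, 2], [3, 4]], 3): A returns -inf, B returns -inf
import Mathlib
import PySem

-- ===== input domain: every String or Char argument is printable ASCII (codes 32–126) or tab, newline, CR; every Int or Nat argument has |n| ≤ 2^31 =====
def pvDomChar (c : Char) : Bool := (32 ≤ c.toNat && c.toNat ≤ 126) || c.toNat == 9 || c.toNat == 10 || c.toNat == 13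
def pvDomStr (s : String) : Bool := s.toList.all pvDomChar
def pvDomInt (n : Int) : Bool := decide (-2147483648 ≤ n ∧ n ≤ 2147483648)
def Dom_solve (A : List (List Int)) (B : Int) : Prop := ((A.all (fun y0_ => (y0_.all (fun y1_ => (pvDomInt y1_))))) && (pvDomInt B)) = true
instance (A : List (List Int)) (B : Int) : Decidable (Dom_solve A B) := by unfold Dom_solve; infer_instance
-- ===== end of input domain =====

-- B replaces A's 2D prefix-sum table (+ inclusion-exclusion queries) by incremental sliding
-- windows (a vector of vertical column sums slid row by row, then a horizontal window over it);
-- same O(N^2) asymptotics, measurably faster by a constant factor (no prefix table, fewer passes).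

-- shared subscription semantics A[i][j] (both Pythons index the same way; in range under Pre_)
def pvIx (A : List (List Int)) (i j : Nat) : Int := (A.getD i []).getD j 0
-- Python's running max seeded with float('-inf'): none plays -inf
def pvMaxO (acc : Option Int) (x : Int) : Option Int :=
  some (match acc with | none => x | some m => max m x)

-- ===== PORT A =====
-- row-wise prefix pass (pf rows are appended one by one, each reading the previous row)
def pvA_rowpf (A : List (List Int)) (N : Nat) : List (List Int) :=
  (List.range N).foldl (fun pf i =>
    pf ++ [(List.range N).map (fun j =>
      if i = 0 then pvIx A i j else (pf.getD (i-1) []).getD j 0 + pvIx A i j)]) []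

-- col-wise prefix pass on one row (in-place left-to-right, j = 0 skipped)
def pvA_colrow (N : Nat) (r : List Int) : List Int :=
  (List.range N).foldl (fun r j => if j = 0 then r else r.set j (r.getD (j-1) 0 + r.getD j 0)) r

-- cur_sum of one window by inclusion-exclusion on pf
def pvA_cur (pf : List (List Int)) (b x y : Nat) : Int :=
  let g : Nat → Nat → Int := fun i j => (pf.getD i []).getD j 0
  let c1 := g (x+b-1) (y+b-1)
  let c2 := if 0 < x then c1 - g (x-1) (y+b-1) else c1
  let c3 := if 0 < y then c2 - g (x+b-1) (y-1) else c2
  if 0 < x ∧ 0 < y then c3 + g (x-1) (y-1) else c3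

def solve (A : List (List Int)) (B : Int) : Int :=
  let N := (A.getD 0 []).length
  let b := B.toNat
  let pf := (pvA_rowpf A N).map (pvA_colrow N)
  let cnt := ((N : Int) - B + 1).toNat
  ((List.range cnt).foldl (fun acc x =>
      (List.range cnt).foldl (fun acc y => pvMaxO acc (pvA_cur pf b x y)) acc)
    (none : Option Int)).getD 0

-- ===== PORT B =====
-- one outer iteration: build V at x = 0, slide it down after, then a horizontal window over V
def pvB_step (A : List (List Int)) (b N cnt : Nat)
    (st : List Int × Option Int) (x : Nat) : List Int × Option Int :=
  let V := if x = 0 then (List.range N).map (fun j => (List.range b).foldl (fun s i => s + pvIx A i j) 0)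
           else (List.range N).map (fun j => st.1.getD j 0 + pvIx A (x+b-1) j - pvIx A (x-1) j)
  let s0 := (List.range b).foldl (fun s j => s + V.getD j 0) 0
  let p := (List.range (cnt-1)).foldl
      (fun (p : Int × Option Int) y0 =>
        let s := p.1 + V.getD (y0 + b) 0 - V.getD y0 0
        (s, pvMaxO p.2 s)) (s0, pvMaxO st.2 s0)
  (V, p.2)

def solve_alt (A : List (List Int)) (B : Int) : Int :=
  let N := (A.getD 0 []).length
  let b := B.toNat
  let cnt := ((N : Int) - B + 1).toNat
  (((List.range cnt).foldl (pvB_step A b N cnt) (([] : List Int), (none : Option Int))).2).getD 0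

-- ===== PRECONDITION & SPEC =====
-- Pre_ excludes inputs where A raises IndexError (empty A, ragged/too-short rows, B < 0),
-- inputs with B > len(A[0]) where A returns float('-inf') (not an Int), and B = 0/negative
-- counts, which are outside the natural domain of a BxB-submatrix problem (A's B = 0 value
-- is an accident of Python's negative-index wraparound).
def Pre_solve (A : List (List Int)) (B : Int) : Prop :=
  A ≠ [] ∧ 1 ≤ B ∧ B ≤ ((A.getD 0 []).length : Int) ∧
  (A.getD 0 []).length ≤ A.length ∧
  ∀ r ∈ A.take (A.getD 0 []).length, (A.getD 0 []).length ≤ r.length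
instance (A : List (List Int)) (B : Int) : Decidable (Pre_solve A B) := by
  unfold Pre_solve; infer_instance

def pvWitness_solve : List (List Int) × Int := ([[1, -2], [3, 4]], 2)

def Spec_solve (A : List (List Int)) (B : Int) (out : Int) : Prop := out = solve_alt A B
instance (A : List (List Int)) (B : Int) (out : Int) : Decidable (Spec_solve A B out) := by
  unfold Spec_solve; infer_instance

-- ===== CLAIM (what is proved, stated in full; the proofs are below) =====
def Claim_equal_solve : Prop :=
  ∀ (A : List (List Int)) (B : Int), Dom_solve A B → Pre_solve A B → Spec_solve A B (solve A B)

-- ===== LEMMAS AND PROOFS =====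

-- proof-only abbreviations
-- window sum of the BxB square at (x, y)
def pvS (f : Nat → Nat → Int) (b x y : Nat) : Int :=
  ∑ i ∈ Finset.range b, ∑ j ∈ Finset.range b, f (x+i) (y+j)
-- exclusive 2D prefix sum
def pvP (f : Nat → Nat → Int) (u v : Nat) : Int :=
  ∑ i ∈ Finset.range u, ∑ j ∈ Finset.range v, f i j
-- vertical window sum of height b starting at row x, column j
def pvC (f : Nat → Nat → Int) (b x j : Nat) : Int := ∑ i ∈ Finset.range b, f (x+i) j
-- horizontal window of width b over pvC
def pvR (f : Nat → Nat → Int) (b x y : Nat) : Int := ∑ j ∈ Finset.range b, pvC f b x (y+j)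
-- the common shape both ports are reduced to
def pvTgt (f : Nat → Nat → Int) (b cnt : Nat) : Option Int :=
  (List.range cnt).foldl (fun acc x =>
    (List.range cnt).foldl (fun acc y => pvMaxO acc (pvS f b x y)) acc) none

lemma pv_set_map_range {α : Type} (f : Nat → α) {n N : Nat} (_h : n < N) (v : α) :
    ((List.range N).map f).set n v = (List.range N).map (fun j => if j = n then v else f j) := by
  apply List.ext_getElem
  · simp
  · intro i h1 h2
    simp at h1
    simp [List.getElem_set]
    by_cases he : i = n
    · simp [he]
    · have hne : ¬ n = i := fun h => he h.symm
      simp [he, hne]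

lemma pv_sum_range (f : Nat → Int) (n : Nat) :
    ((List.range n).map f).sum = ∑ i ∈ Finset.range n, f i := rfl

lemma pv_C_succ (f : Nat → Nat → Int) (b x j : Nat) :
    pvC f b (x+1) j = pvC f b x j + f (x+b) j - f x j := by
  unfold pvC
  have h1 : (∑ i ∈ Finset.range b, f (x+i) j) + f (x+b) j
      = ∑ i ∈ Finset.range (b+1), f (x+i) j := (Finset.sum_range_succ _ _).symm
  have h2 : ∑ i ∈ Finset.range (b+1), f (x+i) j
      = (∑ i ∈ Finset.range b, f (x+1+i) j) + f x j := by
    rw [Finset.sum_range_succ']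
    simp only [Nat.add_zero]
    congr 1
    exact Finset.sum_congr rfl (fun i _ => by rw [show x+1+i = x+(i+1) from by omega])
  linarith

lemma pv_R_succ (f : Nat → Nat → Int) (b x y : Nat) :
    pvR f b x (y+1) = pvR f b x y + pvC f b x (y+b) - pvC f b x y := by
  unfold pvR
  have h1 : (∑ j ∈ Finset.range b, pvC f b x (y+j)) + pvC f b x (y+b)
      = ∑ j ∈ Finset.range (b+1), pvC f b x (y+j) := (Finset.sum_range_succ _ _).symm
  have h2 : ∑ j ∈ Finset.range (b+1), pvC f b x (y+j)
      = (∑ j ∈ Finset.range b, pvC f b x (y+1+j)) + pvC f b x y := by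
    rw [Finset.sum_range_succ']
    simp only [Nat.add_zero]
    congr 1
    exact Finset.sum_congr rfl (fun j _ => by rw [show y+1+j = y+(j+1) from by omega])
  linarith

lemma pv_S_eq_R (f : Nat → Nat → Int) (b x y : Nat) : pvS f b x y = pvR f b x y := by
  unfold pvS pvR pvC
  rw [Finset.sum_comm]

lemma pv_incl_excl (f : Nat → Nat → Int) (b x y : Nat) :
    pvP f (x+b) (y+b) - pvP f x (y+b) - pvP f (x+b) y + pvP f x y = pvS f b x y := by
  have key : ∀ v, pvP f (x+b) v - pvP f x v
      = ∑ i ∈ Finset.range b, ∑ j ∈ Finset.range v, f (x+i) j := by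
    intro v
    unfold pvP
    rw [Finset.sum_range_add]
    ring
  have h2 : ∀ i, (∑ j ∈ Finset.range (y+b), f (x+i) j) - ∑ j ∈ Finset.range y, f (x+i) j
      = ∑ j ∈ Finset.range b, f (x+i) (y+j) := by
    intro i
    rw [Finset.sum_range_add]
    ring
  have : pvP f (x+b) (y+b) - pvP f x (y+b) - (pvP f (x+b) y - pvP f x y)
      = pvS f b x y := by
    rw [key, key, ← Finset.sum_sub_distrib]
    unfold pvS
    exact Finset.sum_congr rfl (fun i _ => h2 i)
  linarith

lemma pv_rowpf_aux (A : List (List Int)) (N : Nat) (n : Nat) (hn : n ≤ N) :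
    (List.range n).foldl (fun pf i => pf ++ [(List.range N).map (fun j =>
        if i = 0 then pvIx A i j else (pf.getD (i-1) []).getD j 0 + pvIx A i j)]) []
      = (List.range n).map (fun i => (List.range N).map (fun j =>
          ∑ i' ∈ Finset.range (i+1), pvIx A i' j)) := by
  induction n with
  | zero => simp
  | succ m ih =>
    rw [List.range_succ, List.foldl_append, List.map_append, ih (by omega)]
    simp only [List.foldl_cons, List.foldl_nil]
    congr 1
    rcases Nat.eq_zero_or_pos m with h0 | hpos
    · subst h0; simp
    · congr 1
      apply List.map_congr_left
      intro j hj
      simp only [List.mem_range] at hj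
      rw [if_neg (by omega)]
      rw [PySem.List.getD_map_range _ _ _ _ (by omega : m - 1 < m)]
      rw [PySem.List.getD_map_range _ _ _ _ hj]
      rw [show m - 1 + 1 = m from by omega, Finset.sum_range_succ]

lemma pv_rowpf_eq (A : List (List Int)) (N : Nat) :
    pvA_rowpf A N = (List.range N).map (fun i => (List.range N).map (fun j =>
      ∑ i' ∈ Finset.range (i+1), pvIx A i' j)) := by
  unfold pvA_rowpf; exact pv_rowpf_aux A N N le_rfl

lemma pv_colrow_aux (N : Nat) (g : Nat → Int) (n : Nat) (hn : n ≤ N) :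
    (List.range n).foldl (fun r j => if j = 0 then r else r.set j (r.getD (j-1) 0 + r.getD j 0))
        ((List.range N).map g)
      = (List.range N).map (fun j =>
          if j < n then ∑ j' ∈ Finset.range (j+1), g j' else g j) := by
  induction n with
  | zero => simp
  | succ m ih =>
    rw [List.range_succ, List.foldl_append, ih (by omega)]
    simp only [List.foldl_cons, List.foldl_nil]
    rcases Nat.eq_zero_or_pos m with h0 | hpos
    · subst h0
      rw [if_pos rfl]
      apply List.map_congr_left
      intro j hj
      by_cases hj0 : j = 0
      · subst hj0; simp
      · rw [if_neg (by omega), if_neg (by omega)]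
    · rw [if_neg (by omega)]
      rw [PySem.List.getD_map_range _ _ _ _ (by omega : m - 1 < N)]
      rw [PySem.List.getD_map_range _ _ _ _ (by omega : m < N)]
      rw [if_pos (by omega), if_neg (by omega)]
      rw [pv_set_map_range _ (by omega : m < N)]
      apply List.map_congr_left
      intro j hj
      simp only [List.mem_range] at hj
      by_cases hjm : j = m
      · rw [if_pos hjm, if_pos (by omega), hjm]
        rw [show m - 1 + 1 = m from by omega, ← Finset.sum_range_succ]
      · rw [if_neg hjm]
        by_cases hlt : j < m
        · rw [if_pos hlt, if_pos (by omega)]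
        · rw [if_neg hlt, if_neg (by omega)]

lemma pv_colrow_eq (N : Nat) (g : Nat → Int) :
    pvA_colrow N ((List.range N).map g)
      = (List.range N).map (fun j => ∑ j' ∈ Finset.range (j+1), g j') := by
  unfold pvA_colrow
  rw [pv_colrow_aux N g N le_rfl]
  apply List.map_congr_left
  intro j hj
  simp only [List.mem_range] at hj
  rw [if_pos hj]

lemma pv_pf_entry (A : List (List Int)) (N i j : Nat) (hi : i < N) (hj : j < N) :
    (((pvA_rowpf A N).map (pvA_colrow N)).getD i []).getD j 0 = pvP (pvIx A) (i+1) (j+1) := by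
  rw [pv_rowpf_eq, List.map_map]
  rw [PySem.List.getD_map_range _ _ _ _ hi]
  simp only [Function.comp]
  rw [pv_colrow_eq]
  rw [PySem.List.getD_map_range _ _ _ _ hj]
  unfold pvP
  exact Finset.sum_comm

lemma pv_cur_eq (A : List (List Int)) (N b x y : Nat) (hb : 1 ≤ b)
    (hx : x + b ≤ N) (hy : y + b ≤ N) :
    pvA_cur ((pvA_rowpf A N).map (pvA_colrow N)) b x y = pvS (pvIx A) b x y := by
  rw [← pv_incl_excl (pvIx A) b x y]
  simp only [pvA_cur]
  have e1 : (((pvA_rowpf A N).map (pvA_colrow N)).getD (x+b-1) []).getD (y+b-1) 0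
      = pvP (pvIx A) (x+b) (y+b) := by
    rw [pv_pf_entry A N _ _ (by omega) (by omega),
        show x+b-1+1 = x+b from by omega, show y+b-1+1 = y+b from by omega]
  have e2 : 0 < x → (((pvA_rowpf A N).map (pvA_colrow N)).getD (x-1) []).getD (y+b-1) 0
      = pvP (pvIx A) x (y+b) := by
    intro h
    rw [pv_pf_entry A N _ _ (by omega) (by omega),
        show x-1+1 = x from by omega, show y+b-1+1 = y+b from by omega]
  have e3 : 0 < y → (((pvA_rowpf A N).map (pvA_colrow N)).getD (x+b-1) []).getD (y-1) 0
      = pvP (pvIx A) (x+b) y := by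
    intro h
    rw [pv_pf_entry A N _ _ (by omega) (by omega),
        show x+b-1+1 = x+b from by omega, show y-1+1 = y from by omega]
  have e4 : 0 < x → 0 < y → (((pvA_rowpf A N).map (pvA_colrow N)).getD (x-1) []).getD (y-1) 0
      = pvP (pvIx A) x y := by
    intro h1 h2
    rw [pv_pf_entry A N _ _ (by omega) (by omega),
        show x-1+1 = x from by omega, show y-1+1 = y from by omega]
  have z1 : ∀ v, pvP (pvIx A) 0 v = 0 := by intro v; simp [pvP]
  have z2 : ∀ u, pvP (pvIx A) u 0 = 0 := by intro u; simp [pvP]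
  by_cases hx0 : 0 < x <;> by_cases hy0 : 0 < y
  · rw [if_pos hx0, if_pos hy0, if_pos ⟨hx0, hy0⟩, e1, e2 hx0, e3 hy0, e4 hx0 hy0]
  · rw [if_pos hx0, if_neg hy0, if_neg (by tauto), e1, e2 hx0,
        show y = 0 from by omega, z2, z2]
    ring
  · rw [if_neg hx0, if_pos hy0, if_neg (by tauto), e1, e3 hy0,
        show x = 0 from by omega, z1, z1]
    ring
  · rw [if_neg hx0, if_neg hy0, if_neg (by tauto), e1,
        show x = 0 from by omega, show y = 0 from by omega, z1, z1, z2]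
    ring

lemma pv_V0_eq (A : List (List Int)) (b N : Nat) :
    (List.range N).map (fun j => (List.range b).foldl (fun s i => s + pvIx A i j) 0)
      = (List.range N).map (fun j => pvC (pvIx A) b 0 j) := by
  apply List.map_congr_left
  intro j _
  rw [PySem.List.foldl_add, pv_sum_range, zero_add]
  exact Finset.sum_congr rfl (fun i _ => by rw [Nat.zero_add])

lemma pv_inner_aux (f : Nat → Nat → Int) (b N cnt x : Nat) (hb : 1 ≤ b) (hbN : b ≤ N)
    (hcnt : cnt = N - b + 1) (acc : Option Int) (m : Nat) (hm : m ≤ cnt - 1) :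
    (List.range m).foldl (fun (p : Int × Option Int) y0 =>
        let s := p.1 + ((List.range N).map (fun j => pvC f b x j)).getD (y0 + b) 0
                     - ((List.range N).map (fun j => pvC f b x j)).getD y0 0
        (s, pvMaxO p.2 s)) (pvR f b x 0, pvMaxO acc (pvS f b x 0))
      = (pvR f b x m, (List.range (m+1)).foldl (fun a y => pvMaxO a (pvS f b x y)) acc) := by
  induction m with
  | zero => simp [List.range_one]
  | succ k ih =>
    rw [List.range_succ, List.foldl_append, ih (by omega)]
    simp only [List.foldl_cons, List.foldl_nil]
    rw [PySem.List.getD_map_range _ _ _ _ (by omega : k + b < N),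
        PySem.List.getD_map_range _ _ _ _ (by omega : k < N)]
    rw [← pv_R_succ f b x k]
    conv_rhs => rw [List.range_succ]
    rw [List.foldl_append]
    simp only [List.foldl_cons, List.foldl_nil]
    rw [pv_S_eq_R f b x (k+1)]

lemma pv_step_eq (A : List (List Int)) (b N cnt : Nat) (hb : 1 ≤ b) (hbN : b ≤ N)
    (hcnt : cnt = N - b + 1) (x : Nat) (_hx : x < cnt) (st1 : List Int) (acc : Option Int)
    (hst : 0 < x → st1 = (List.range N).map (fun j => pvC (pvIx A) b (x-1) j)) :
    pvB_step A b N cnt (st1, acc) x =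
      ((List.range N).map (fun j => pvC (pvIx A) b x j),
       (List.range cnt).foldl (fun a y => pvMaxO a (pvS (pvIx A) b x y)) acc) := by
  have hV : (if x = 0 then (List.range N).map (fun j => (List.range b).foldl (fun s i => s + pvIx A i j) 0)
      else (List.range N).map (fun j =>
        st1.getD j 0 + pvIx A (x+b-1) j - pvIx A (x-1) j))
      = (List.range N).map (fun j => pvC (pvIx A) b x j) := by
    by_cases hx0 : x = 0
    · rw [if_pos hx0, hx0, pv_V0_eq]
    · rw [if_neg hx0, hst (by omega)]
      apply List.map_congr_left
      intro j hj
      simp only [List.mem_range] at hj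
      rw [PySem.List.getD_map_range _ _ _ _ hj]
      rw [show x + b - 1 = (x-1) + b from by omega, ← pv_C_succ,
          show x - 1 + 1 = x from by omega]
  simp only [pvB_step, hV]
  have hs0 : (List.range b).foldl
      (fun s j => s + ((List.range N).map (fun j => pvC (pvIx A) b x j)).getD j 0) 0
      = pvR (pvIx A) b x 0 := by
    rw [PySem.List.foldl_add, pv_sum_range, zero_add]
    exact Finset.sum_congr rfl (fun j hj => by
      rw [PySem.List.getD_map_range _ _ _ _ (by exact lt_of_lt_of_le (Finset.mem_range.mp hj) hbN),
          Nat.zero_add])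
  rw [hs0]
  have hS0 : pvR (pvIx A) b x 0 = pvS (pvIx A) b x 0 := (pv_S_eq_R _ _ _ _).symm
  rw [show (pvMaxO acc (pvR (pvIx A) b x 0)) = pvMaxO acc (pvS (pvIx A) b x 0) from by rw [hS0]]
  conv_lhs => rw [show pvR (pvIx A) b x 0 = pvR (pvIx A) b x 0 from rfl]
  rw [pv_inner_aux (pvIx A) b N cnt x hb hbN hcnt acc (cnt-1) le_rfl]
  rw [show cnt - 1 + 1 = cnt from by omega]

lemma pv_outer_eq (A : List (List Int)) (b N cnt : Nat) (hb : 1 ≤ b) (hbN : b ≤ N)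
    (hcnt : cnt = N - b + 1) (n : Nat) (hn : n ≤ cnt) :
    (List.range n).foldl (pvB_step A b N cnt) (([] : List Int), (none : Option Int)) =
      ((if n = 0 then ([] : List Int)
        else (List.range N).map (fun j => pvC (pvIx A) b (n-1) j)),
       (List.range n).foldl (fun acc x =>
         (List.range cnt).foldl (fun a y => pvMaxO a (pvS (pvIx A) b x y)) acc) none) := by
  induction n with
  | zero => simp
  | succ k ih =>
    rw [List.range_succ, List.foldl_append, ih (by omega)]
    simp only [List.foldl_cons, List.foldl_nil]
    rw [pv_step_eq A b N cnt hb hbN hcnt k (by omega) _ _ (by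
      intro hk
      rw [if_neg (by omega)])]
    rw [List.foldl_append]
    simp only [List.foldl_cons, List.foldl_nil, Nat.add_sub_cancel, if_neg (Nat.succ_ne_zero k)]

lemma pv_solveA_eq (A : List (List Int)) (B : Int) (hPre : Pre_solve A B) :
    solve A B = (pvTgt (pvIx A) B.toNat (((A.getD 0 []).length : Int) - B + 1).toNat).getD 0 := by
  obtain ⟨-, hB1, hBN, -, -⟩ := hPre
  simp only [solve, pvTgt]
  congr 1
  apply PySem.List.foldl_congr_mem
  intro acc x hxm
  simp only [List.mem_range] at hxm
  apply PySem.List.foldl_congr_mem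
  intro acc' y hy
  simp only [List.mem_range] at hy
  rw [pv_cur_eq A ((A.getD 0 []).length) B.toNat x y (by omega) (by omega) (by omega)]

lemma pv_solveB_eq (A : List (List Int)) (B : Int) (hPre : Pre_solve A B) :
    solve_alt A B = (pvTgt (pvIx A) B.toNat (((A.getD 0 []).length : Int) - B + 1).toNat).getD 0 := by
  obtain ⟨-, hB1, hBN, -, -⟩ := hPre
  simp only [solve_alt, pvTgt]
  congr 1
  rw [pv_outer_eq A B.toNat ((A.getD 0 []).length)
      ((((A.getD 0 []).length : Int) - B + 1).toNat) (by omega) (by omega) (by omega)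
      ((((A.getD 0 []).length : Int) - B + 1).toNat) le_rfl]

-- ===== VERDICT (by name: the statement is the Claim_ definition above) =====
theorem solve_spec : Claim_equal_solve := by
  intro A B _hDom hPre
  unfold Spec_solve
  rw [pv_solveA_eq A B hPre, pv_solveB_eq A B hPre]
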